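-- pv_equiv track=rewrite | github.com/bharavidesai01/neural-network-omr | omr_output_adapter.py | sparse_tensor_to_strings
-- ===== SOURCE A (Python) =====
-- def sparse_tensor_to_strings(
--
--     sparse_tensor):
--     indices = sparse_tensor[0][0]
--     values = sparse_tensor[0][1]
--     dense_shape = sparse_tensor[0][2]
--
--     strings = [[] for i in range(dense_shape[0])]
--     string = []
--     last_index = 0
--
--     for i in range(len(indices)):
--         if indices[i][0] != last_index:
--             strings[last_index] = string
--             string = []
--             last_index = indices[i][0]
--         string.append(values[i])
--     strings[last_index] = string
--     return strings
-- ===== SOURCE B (Python) =====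
-- def sparse_tensor_to_strings(sparse_tensor):
--     indices, values, dense_shape = sparse_tensor[0]
--
--     # Pair each row key with its value, then segment the pair list into
--     # maximal runs of equal key with two indices; each run is written into
--     # its row as a slice (a later run of the same row overwrites an earlier one).
--     pairs = list(zip([row[0] for row in indices], values))
--     strings = [[] for _ in range(dense_shape[0])]
--     n = len(pairs)
--     i = 0
--     while i < n:
--         key = pairs[i][0]
--         j = i + 1
--         while j < n and pairs[j][0] == key:
--             j += 1
--         strings[key] = [v for _, v in pairs[i:j]]
--         i = j
--     return strings
-- ===== Notes on version B (the rewrite author's own statement) =====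
-- stated objective: alternative
-- what changed: Replaces A's sentinel-and-accumulator single pass (last_index, growing current string, flush on change) by a stateless staged formulation: zip row keys with values, then segment the pair list into maximal equal-key runs with a two-index scan and write each run slice directly into its row.
import Mathlib
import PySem

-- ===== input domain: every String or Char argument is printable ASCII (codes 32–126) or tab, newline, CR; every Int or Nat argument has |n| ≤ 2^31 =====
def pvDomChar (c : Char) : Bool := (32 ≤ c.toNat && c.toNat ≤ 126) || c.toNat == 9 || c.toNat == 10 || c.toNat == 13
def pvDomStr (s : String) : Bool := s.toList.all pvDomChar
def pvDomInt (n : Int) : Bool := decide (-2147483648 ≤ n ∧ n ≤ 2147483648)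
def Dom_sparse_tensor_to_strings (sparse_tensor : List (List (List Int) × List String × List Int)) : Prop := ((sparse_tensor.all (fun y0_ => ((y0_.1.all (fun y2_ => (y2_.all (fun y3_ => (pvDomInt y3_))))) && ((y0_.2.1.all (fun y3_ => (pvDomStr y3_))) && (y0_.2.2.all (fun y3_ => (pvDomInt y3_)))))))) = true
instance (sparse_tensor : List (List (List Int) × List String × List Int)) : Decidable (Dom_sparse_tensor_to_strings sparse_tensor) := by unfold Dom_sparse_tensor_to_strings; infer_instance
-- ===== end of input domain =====

-- B replaces A's sentinel-and-accumulator pass by a stateless staged formulation (zip keys with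
-- values, segment into maximal equal-key runs, write each run slice into its row); objective:
-- alternative, same cost.

-- ===== PORT A =====
def sparse_tensor_to_strings (sparse_tensor : List (List (List Int) × List String × List Int)) : List (List String) :=
  let first := PySem.List.pyGetD sparse_tensor 0 ([], [], [])
  let indices := first.1
  let values := first.2.1
  let dense_shape := first.2.2
  let strings : List (List String) :=
    (PySem.List.pyRange 0 (PySem.List.pyGetD dense_shape 0 0) 1).map (fun _ => [])
  let st :=
    (PySem.List.pyRange 0 (indices.length : Int) 1).foldl
      (fun (acc : List (List String) × List String × Int) i =>
        let k := PySem.List.pyGetD (PySem.List.pyGetD indices i []) 0 0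
        let v := PySem.List.pyGetD values i ""
        if k ≠ acc.2.2 then
          (PySem.List.pySetD acc.1 acc.2.2 acc.2.1, [v], k)
        else
          (acc.1, acc.2.1 ++ [v], acc.2.2))
      (strings, [], 0)
  PySem.List.pySetD st.1 st.2.2 st.2.1

-- ===== PORT B =====
-- the outer while loop of B: split off the maximal run of the first key, write it into its row
def pvRuns (strings : List (List String)) : List (Int × String) → List (List String)
  | [] => strings
  | (k, v) :: rest =>
      let run := rest.takeWhile (fun kv => kv.1 == k)
      pvRuns (PySem.List.pySetD strings k (v :: run.map Prod.snd)) (rest.dropWhile (fun kv => kv.1 == k))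
  termination_by pairs => pairs.length
  decreasing_by
    simpa using Nat.lt_succ_of_le (List.length_dropWhile_le _ rest)

def sparse_tensor_to_strings_alt (sparse_tensor : List (List (List Int) × List String × List Int)) : List (List String) :=
  let first := PySem.List.pyGetD sparse_tensor 0 ([], [], [])
  let indices := first.1
  let values := first.2.1
  let dense_shape := first.2.2
  let pairs : List (Int × String) := (indices.map (fun row => PySem.List.pyGetD row 0 0)).zip values
  let strings : List (List String) :=
    (PySem.List.pyRange 0 (PySem.List.pyGetD dense_shape 0 0) 1).map (fun _ => [])
  pvRuns strings pairs

-- ===== PRECONDITION & SPEC =====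
-- Pre_ excludes exactly the inputs on which A raises: empty tensor list, empty dense_shape,
-- dense_shape[0] < 1 (the final strings[last_index] write fails), an empty index row,
-- a row index outside [-dense_shape[0], dense_shape[0]), or fewer values than index rows.
def Pre_sparse_tensor_to_strings (sparse_tensor : List (List (List Int) × List String × List Int)) : Prop :=
  sparse_tensor ≠ [] ∧
  sparse_tensor.headI.2.2 ≠ [] ∧
  1 ≤ sparse_tensor.headI.2.2.headI ∧
  sparse_tensor.headI.1.length ≤ sparse_tensor.headI.2.1.length ∧
  ∀ row ∈ sparse_tensor.headI.1,
    row ≠ [] ∧ -sparse_tensor.headI.2.2.headI ≤ row.headI ∧ row.headI < sparse_tensor.headI.2.2.headI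
instance (sparse_tensor : List (List (List Int) × List String × List Int)) : Decidable (Pre_sparse_tensor_to_strings sparse_tensor) := by unfold Pre_sparse_tensor_to_strings; infer_instance

def pvWitness_sparse_tensor_to_strings : (List (List (List Int) × List String × List Int)) :=
  [([[0], [1], [1]], ["a", "b", "c"], [2])]

def Spec_sparse_tensor_to_strings (sparse_tensor : List (List (List Int) × List String × List Int)) (out : List (List String)) : Prop := out = sparse_tensor_to_strings_alt sparse_tensor
instance (sparse_tensor : List (List (List Int) × List String × List Int)) (out : List (List String)) : Decidable (Spec_sparse_tensor_to_strings sparse_tensor out) := by unfold Spec_sparse_tensor_to_strings; infer_instance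

-- ===== CLAIM (what is proved, stated in full; the proofs are below) =====
def Claim_equal_sparse_tensor_to_strings : Prop := ∀ (sparse_tensor : List (List (List Int) × List String × List Int)), Dom_sparse_tensor_to_strings sparse_tensor → Pre_sparse_tensor_to_strings sparse_tensor → Spec_sparse_tensor_to_strings sparse_tensor (sparse_tensor_to_strings sparse_tensor)

-- ===== LEMMAS AND PROOFS =====

-- A's loop step on a (row-key, value) pair
def pvStepA (acc : List (List String) × List String × Int) (kv : Int × String) :
    List (List String) × List String × Int :=
  if kv.1 ≠ acc.2.2 then (PySem.List.pySetD acc.1 acc.2.2 acc.2.1, [kv.2], kv.1)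
  else (acc.1, acc.2.1 ++ [kv.2], acc.2.2)

-- A's fold followed by the trailing flush equals B's run-splitting recursion, for any
-- in-flight partial run (cur, k)
theorem pv_loop_eq (kvs : List (Int × String)) :
    ∀ (s : List (List String)) (cur : List String) (k : Int),
    (PySem.List.pySetD (kvs.foldl pvStepA (s, cur, k)).1
      (kvs.foldl pvStepA (s, cur, k)).2.2 (kvs.foldl pvStepA (s, cur, k)).2.1)
    = pvRuns (PySem.List.pySetD s k (cur ++ (kvs.takeWhile (fun kv => kv.1 == k)).map Prod.snd))
        (kvs.dropWhile (fun kv => kv.1 == k)) := by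
  induction kvs with
  | nil =>
      intro s cur k
      simp [pvRuns]
  | cons kv t ih =>
      intro s cur k
      obtain ⟨k1, v1⟩ := kv
      by_cases h : k1 = k
      · have hA : pvStepA (s, cur, k) (k1, v1) = (s, cur ++ [v1], k) := by
          simp [pvStepA, h]
        simp only [List.foldl_cons, hA]
        rw [ih s (cur ++ [v1]) k]
        simp [h]
      · have hA : pvStepA (s, cur, k) (k1, v1) = (PySem.List.pySetD s k cur, [v1], k1) := by
          simp [pvStepA, h]
        simp only [List.foldl_cons, hA]
        rw [ih (PySem.List.pySetD s k cur) [v1] k1]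
        have hp : ((k1, v1).1 == k) = false := by simp [h]
        rw [List.takeWhile_cons_of_neg (by simpa using hp),
            List.dropWhile_cons_of_neg (by simpa using hp)]
        simp only [List.map_nil, List.append_nil, List.singleton_append]
        rw [pvRuns]
      
-- an index loop over range(len(xs)) reading xs[i] is a loop over enumerate(xs)
theorem pv_foldl_range_enum {α σ : Type} (d : α) (g : σ → Int → α → σ) :
    ∀ (xs pre : List α) (init : σ),
    (PySem.List.pyRange (pre.length : Int) ((pre ++ xs).length : Int) 1).foldl
        (fun acc i => g acc i (PySem.List.pyGetD (pre ++ xs) i d)) init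
    = (PySem.List.enumerate xs (pre.length : Int)).foldl (fun acc iv => g acc iv.1 iv.2) init := by
  intro xs
  induction xs with
  | nil =>
      intro pre init
      rw [PySem.List.pyRange_one_eq_nil (by simp)]
      simp [PySem.List.enumerate_nil]
  | cons x t ih =>
      intro pre init
      rw [PySem.List.pyRange_one_cons (by simp)]
      rw [PySem.List.enumerate_cons]
      simp only [List.foldl_cons]
      have hget : PySem.List.pyGetD (pre ++ x :: t) (pre.length : Int) d = x := by
        rw [PySem.List.pyGetD_natCast]
        simp
      rw [hget]
      have h1 : ((pre ++ [x]).length : Int) = (pre.length : Int) + 1 := by simp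
      have h2 : (pre ++ [x]) ++ t = pre ++ x :: t := by simp
      have := ih (pre ++ [x]) (g init (pre.length : Int) x)
      rw [h2, h1] at this
      exact this

-- under len(indices) ≤ len(values), A's per-index reads enumerate exactly B's key/value zip
theorem pv_enum_eq_zip (indices : List (List Int)) (values : List String)
    (hlen : indices.length ≤ values.length) :
    (PySem.List.enumerate indices 0).map
        (fun iv => (PySem.List.pyGetD iv.2 0 0, PySem.List.pyGetD values iv.1 ""))
    = (indices.map (fun row => PySem.List.pyGetD row 0 0)).zip values := by
  apply List.ext_getElem
  · simp [PySem.List.length_enumerate]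
    omega
  · intro i h1 h2
    have hi : i < indices.length := by
      simpa [PySem.List.length_enumerate] using h1
    have hiv : i < values.length := lt_of_lt_of_le hi hlen
    rw [List.getElem_map, PySem.List.getElem_enumerate]
    rw [List.getElem_zip, List.getElem_map]
    have hv : PySem.List.pyGetD values ((0 : Int) + (i : Int)) "" = values[i] := by
      rw [zero_add, PySem.List.pyGetD_natCast, List.getD_eq_getElem?_getD,
          List.getElem?_eq_getElem hiv, Option.getD_some]
    simp only [hv]

-- writing [] into row 0 of the fresh all-[] table is a no-op (dense_shape[0] ≥ 1)
theorem pv_noop (n : Int) (hn : 1 ≤ n) :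
    PySem.List.pySetD ((PySem.List.pyRange 0 n 1).map (fun _ => ([] : List String))) 0 []
    = (PySem.List.pyRange 0 n 1).map (fun _ => ([] : List String)) := by
  rw [PySem.List.pyRange_one_cons (by omega)]
  simp [PySem.List.pySetD_of_nonneg]

-- A's fold from the initial state (fresh table, empty run, sentinel 0) is B's recursion,
-- provided writing [] at row 0 does not change the table
theorem pv_start (s0 : List (List String)) (kvs : List (Int × String))
    (hnoop : PySem.List.pySetD s0 0 [] = s0) :
    (PySem.List.pySetD (kvs.foldl pvStepA (s0, [], 0)).1
      (kvs.foldl pvStepA (s0, [], 0)).2.2 (kvs.foldl pvStepA (s0, [], 0)).2.1)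
    = pvRuns s0 kvs := by
  cases kvs with
  | nil => simpa [pvRuns] using hnoop
  | cons kv t =>
      obtain ⟨k, v⟩ := kv
      have hA : pvStepA (s0, [], 0) (k, v) = (s0, [v], k) := by
        by_cases h : k = (0 : Int)
        · simp [pvStepA, h]
        · simp [pvStepA, h, hnoop]
      simp only [List.foldl_cons, hA]
      rw [pv_loop_eq t s0 [v] k]
      simp only [List.singleton_append]
      rw [pvRuns]

-- the two ports agree on any admitted first element
theorem pv_main (indices : List (List Int)) (values : List String) (n : Int) (ds' : List Int)
    (rest : List (List (List Int) × List String × List Int)) (hn : 1 ≤ n)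
    (hlen : indices.length ≤ values.length) :
    sparse_tensor_to_strings ((indices, values, n :: ds') :: rest)
    = sparse_tensor_to_strings_alt ((indices, values, n :: ds') :: rest) := by
  unfold sparse_tensor_to_strings sparse_tensor_to_strings_alt
  simp only [PySem.List.pyGetD_zero_cons]
  show (fun r : List (List String) × List String × Int => PySem.List.pySetD r.1 r.2.2 r.2.1)
      ((PySem.List.pyRange 0 (indices.length : Int) 1).foldl
        (fun acc i => pvStepA acc
          (PySem.List.pyGetD (PySem.List.pyGetD indices i []) 0 0, PySem.List.pyGetD values i ""))
        ((PySem.List.pyRange 0 n 1).map (fun _ => []), [], 0))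
    = pvRuns ((PySem.List.pyRange 0 n 1).map (fun _ => []))
        ((indices.map (fun row => PySem.List.pyGetD row 0 0)).zip values)
  have hre := pv_foldl_range_enum ([] : List Int)
    (fun acc i row => pvStepA acc (PySem.List.pyGetD row 0 0, PySem.List.pyGetD values i ""))
    indices []
    (((PySem.List.pyRange 0 n 1).map (fun _ => ([] : List String))), ([] : List String), (0 : Int))
  simp only [List.nil_append, List.length_nil, Nat.cast_zero] at hre
  rw [hre]
  rw [← List.foldl_map (f := fun iv : Int × List Int =>
        (PySem.List.pyGetD iv.2 0 0, PySem.List.pyGetD values iv.1 "")) (g := pvStepA)]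
  rw [pv_enum_eq_zip indices values hlen]
  exact pv_start _ _ (pv_noop n hn)

-- ===== VERDICT (by name: the statement is the Claim_ definition above) =====
theorem sparse_tensor_to_strings_spec : Claim_equal_sparse_tensor_to_strings := by
  intro st _ hpre
  obtain ⟨hne, hds, hn1, hlen, -⟩ := hpre
  obtain ⟨⟨indices, values, dense_shape⟩, rest, rfl⟩ : ∃ x r, st = x :: r := by
    cases st with
    | nil => exact absurd rfl hne
    | cons x r => exact ⟨x, r, rfl⟩
  obtain ⟨n, ds', rfl⟩ : ∃ n r, dense_shape = n :: r := by
    cases dense_shape with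
    | nil => exact absurd rfl hds
    | cons n r => exact ⟨n, r, rfl⟩
  simp only [List.headI] at hn1 hlen
  show Spec_sparse_tensor_to_strings _ _
  unfold Spec_sparse_tensor_to_strings
  exact pv_main indices values n ds' rest hn1 hlen
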